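-- pv_equiv track=rewrite | github.com/S-A-I-V/CodeForcesProblem | swapdil.py | can_swap_arrays
-- ===== SOURCE A (Python) =====
-- def can_swap_arrays(a, b, n):
--     # Initialize DP table
--     dp = [[False] * (n + 1) for _ in range(n + 1)]
--     dp[0][0] = True
--
--     for i in range(1, n + 1):
--         for j in range(1, n + 1):
--             # If the current elements are equal, propagate the previous state
--             if a[i - 1] == b[j - 1]:
--                 dp[i][j] = dp[i - 1][j - 1]
--
--             # Check for valid swaps
--             for k in range(i):
--                 if sorted(a[k:i]) == sorted(b[j - (i - k):j]):
--                     dp[i][j] = dp[i][j] or dp[k][j - (i - k)]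
--
--     return dp[n][n]
-- ===== SOURCE B (Python) =====
-- def can_swap_arrays(a, b, n):
--     # The DP is reachability by splitting [0,n) into blocks with equal multisets;
--     # taking the whole range as one block shows the answer is just prefix multiset equality.
--     return sorted(a[:n]) == sorted(b[:n])
-- ===== Notes on version B (the rewrite author's own statement) =====
-- stated objective: faster
-- what changed: Replaces the O(n^4 log n) DP over all (i,j,k) block splits with a single multiset test sorted(a[:n]) == sorted(b[:n]); the DP provably returns true exactly when the n-prefixes are permutations of each other (the whole-range split k=0 already witnesses it).
import Mathlib
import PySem

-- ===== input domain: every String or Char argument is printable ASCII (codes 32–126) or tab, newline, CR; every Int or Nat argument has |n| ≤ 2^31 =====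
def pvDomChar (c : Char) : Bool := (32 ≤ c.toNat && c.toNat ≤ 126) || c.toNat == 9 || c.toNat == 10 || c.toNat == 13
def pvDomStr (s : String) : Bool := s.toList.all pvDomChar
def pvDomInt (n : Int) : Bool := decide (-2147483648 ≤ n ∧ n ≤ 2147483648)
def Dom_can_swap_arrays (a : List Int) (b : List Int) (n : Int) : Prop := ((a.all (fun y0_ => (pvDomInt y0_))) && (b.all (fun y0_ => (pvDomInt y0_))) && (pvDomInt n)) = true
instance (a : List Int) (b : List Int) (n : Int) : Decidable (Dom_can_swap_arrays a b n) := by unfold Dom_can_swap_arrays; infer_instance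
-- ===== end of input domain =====

-- B replaces A's O(n^4 log n) block-split DP by the single multiset test sorted(a[:n]) == sorted(b[:n]),
-- which the DP provably computes (objective: faster, asymptotic).

-- ===== PORT A =====
-- dp[r][c] read; the .getD false default is only reached where Python would raise (excluded by Pre_)
def pvGetCell (dp : List (List Bool)) (i j : Int) : Bool :=
  ((PySem.List.pyGet? dp i).bind fun r => PySem.List.pyGet? r j).getD false

-- dp[r][c] = v; every write in A uses nonnegative in-range indices, so .toNat is exact there
def pvSetCell (dp : List (List Bool)) (i j : Int) (v : Bool) : List (List Bool) :=
  dp.set i.toNat ((dp.getD i.toNat []).set j.toNat v)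

-- the 'for k in range(i)' body
def pvKBody (a b : List Int) (i j : Int) (dp : List (List Bool)) (k : Int) : List (List Bool) :=
  if PySem.List.sorted (PySem.List.slice a (some k) (some i)) (fun x => x) false
      == PySem.List.sorted (PySem.List.slice b (some (j - (i - k))) (some j)) (fun x => x) false then
    pvSetCell dp i j (pvGetCell dp i j || pvGetCell dp k (j - (i - k)))
  else dp

-- the 'for j in range(1, n+1)' body: the equal-elements propagation, then the k loop
def pvJBody (a b : List Int) (i : Int) (dp : List (List Bool)) (j : Int) : List (List Bool) :=
  (PySem.List.pyRange 0 i 1).foldl (pvKBody a b i j)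
    (if PySem.List.pyGetD a (i - 1) 0 == PySem.List.pyGetD b (j - 1) 0 then
       pvSetCell dp i j (pvGetCell dp (i - 1) (j - 1))
     else dp)

-- the 'for i in range(1, n+1)' body
def pvIBody (a b : List Int) (n : Int) (dp : List (List Bool)) (i : Int) : List (List Bool) :=
  (PySem.List.pyRange 1 (n + 1) 1).foldl (pvJBody a b i) dp

def can_swap_arrays (a : List Int) (b : List Int) (n : Int) : Bool :=
  pvGetCell
    ((PySem.List.pyRange 1 (n + 1) 1).foldl (pvIBody a b n)
      (pvSetCell (List.replicate (n + 1).toNat (List.replicate (n + 1).toNat false)) 0 0 true))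
    n n

-- ===== PORT B =====
def can_swap_arrays_alt (a : List Int) (b : List Int) (n : Int) : Bool :=
  PySem.List.sorted (PySem.List.slice a none (some n)) (fun x => x) false
    == PySem.List.sorted (PySem.List.slice b none (some n)) (fun x => x) false

-- ===== PRECONDITION & SPEC =====
-- exactly the inputs where A returns (otherwise A's element reads dp[0][0], a[i-1] or b[j-1] raise IndexError)
def Pre_can_swap_arrays (a : List Int) (b : List Int) (n : Int) : Prop :=
  0 ≤ n ∧ n ≤ (a.length : Int) ∧ n ≤ (b.length : Int)
instance (a : List Int) (b : List Int) (n : Int) : Decidable (Pre_can_swap_arrays a b n) := by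
  unfold Pre_can_swap_arrays; infer_instance

def pvWitness_can_swap_arrays : List Int × List Int × Int := ([1, 2], [2, 1], 2)

def Spec_can_swap_arrays (a : List Int) (b : List Int) (n : Int) (out : Bool) : Prop :=
  out = can_swap_arrays_alt a b n
instance (a : List Int) (b : List Int) (n : Int) (out : Bool) : Decidable (Spec_can_swap_arrays a b n out) := by
  unfold Spec_can_swap_arrays; infer_instance

-- ===== CLAIM (what is proved, stated in full; the proofs are below) =====
def Claim_equal_can_swap_arrays : Prop := ∀ (a : List Int) (b : List Int) (n : Int), Dom_can_swap_arrays a b n → Pre_can_swap_arrays a b n → Spec_can_swap_arrays a b n (can_swap_arrays a b n)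

-- ===== LEMMAS AND PROOFS =====

-- the value A's dp finally holds at (i, j)
def pvSpecCell (a b : List Int) (i j : Nat) : Bool :=
  decide (i = j ∧ (a.take i).Perm (b.take i))

-- row i of the dp while its cells up to column j are being filled; column j holds v
def pvRowV (a b : List Int) (m i j : Nat) (v : Bool) : List Bool :=
  (List.range (m + 1)).map fun c => if c = j then v else if c < j then pvSpecCell a b i c else false

-- the dp while row i is being filled: rows below i final, row i = pvRowV, rows above untouched
def pvMatV (a b : List Int) (m i j : Nat) (v : Bool) : List (List Bool) :=
  (List.range (m + 1)).map fun r =>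
    if r < i then (List.range (m + 1)).map (pvSpecCell a b r)
    else if r = i then pvRowV a b m i j v
    else List.replicate (m + 1) false

-- the accumulated k-loop disjunct after k = 0 .. K-1
def pvOrK (a b : List Int) (i j K : Nat) : Bool :=
  (List.range K).any fun k =>
    (PySem.List.sorted (PySem.List.slice a (some (k : Int)) (some (i : Int))) (fun x => x) false
      == PySem.List.sorted (PySem.List.slice b (some ((j : Int) - ((i : Int) - (k : Int)))) (some (j : Int))) (fun x => x) false)
    && pvSpecCell a b k ((j : Int) - (i : Int) + (k : Int)).toNat

lemma pv_set_map_range {α : Type} (f : Nat → α) (M k : Nat) (v : α) :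
    ((List.range M).map f).set k v = (List.range M).map fun x => if x = k then v else f x := by
  apply List.ext_getElem (by simp)
  intro idx h1 h2
  simp only [List.getElem_set, List.getElem_map, List.getElem_range]
  split <;> split <;> first | rfl | omega

lemma pv_getD_map_range {α : Type} (f : Nat → α) (M k : Nat) (d : α) (hk : k < M) :
    ((List.range M).map f).getD k d = f k := by
  rw [List.getD_eq_getElem?_getD]
  simp [hk]

lemma pvGetCell_matV_lt (a b : List Int) (m i j : Nat) (v : Bool) (r c : Nat)
    (hr : r < i) (hrm : r ≤ m) (hc : c ≤ m) :
    pvGetCell (pvMatV a b m i j v) (r : Int) (c : Int) = pvSpecCell a b r c := by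
  unfold pvGetCell pvMatV
  have h1 : r < m + 1 := by omega
  have h2 : c < m + 1 := by omega
  simp [PySem.List.pyGet?_natCast, h1, h2, hr]

lemma pvGetCell_matV_self (a b : List Int) (m i j : Nat) (v : Bool)
    (hi : i ≤ m) (hj : j ≤ m) :
    pvGetCell (pvMatV a b m i j v) (i : Int) (j : Int) = v := by
  unfold pvGetCell pvMatV pvRowV
  have h1 : i < m + 1 := by omega
  have h2 : j < m + 1 := by omega
  simp [PySem.List.pyGet?_natCast, h1, h2]

lemma pvSetCell_matV (a b : List Int) (m i j : Nat) (v w : Bool)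
    (hi : i ≤ m) (_hj : j ≤ m) :
    pvSetCell (pvMatV a b m i j v) (i : Int) (j : Int) w = pvMatV a b m i j w := by
  have hrow : (pvRowV a b m i j v).set j w = pvRowV a b m i j w := by
    unfold pvRowV
    rw [pv_set_map_range]
    apply List.map_congr_left
    intro c _
    by_cases hcj : c = j <;> simp [hcj]
  unfold pvSetCell pvMatV
  rw [Int.toNat_natCast, Int.toNat_natCast]
  have hgd : (((List.range (m + 1)).map fun r =>
      if r < i then (List.range (m + 1)).map (pvSpecCell a b r)
      else if r = i then pvRowV a b m i j v
      else List.replicate (m + 1) false)).getD i [] = pvRowV a b m i j v := by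
    rw [pv_getD_map_range _ _ _ _ (by omega : i < m + 1)]
    simp
  rw [hgd, hrow, pv_set_map_range]
  apply List.map_congr_left
  intro x _
  by_cases hxi : x = i
  · simp [hxi]
  · rw [if_neg hxi]
    by_cases hxl : x < i
    · simp [hxl]
    · simp [hxl, hxi]

lemma pvRowV_zero_false (a b : List Int) (m i : Nat) :
    pvRowV a b m i 0 false = List.replicate (m + 1) false := by
  unfold pvRowV
  apply List.ext_getElem (by simp)
  intro idx h1 h2
  simp only [List.getElem_map, List.getElem_range, List.getElem_replicate]
  split
  · rfl
  · rw [if_neg (by omega)]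

lemma pvMatV_col_shift (a b : List Int) (m i j : Nat) :
    pvMatV a b m i j (pvSpecCell a b i j) = pvMatV a b m i (j + 1) false := by
  unfold pvMatV
  apply List.map_congr_left
  intro r _
  by_cases h1 : r < i
  · simp [h1]
  · by_cases h2 : r = i
    · simp only [h2, lt_self_iff_false, if_false]
      unfold pvRowV
      apply List.map_congr_left
      intro c _
      by_cases hcj : c = j
      · simp [hcj, (show j < j + 1 by omega)]
      · by_cases hcl : c < j
        · simp [hcj, hcl, (show c ≠ j + 1 by omega), (show c < j + 1 by omega)]
        · simp [hcj, hcl, (show ¬ c < j + 1 by omega)]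
    · simp [h1, h2]

lemma pvMatV_row_shift (a b : List Int) (m i : Nat) :
    pvMatV a b m i m (pvSpecCell a b i m) = pvMatV a b m (i + 1) 0 false := by
  unfold pvMatV
  apply List.map_congr_left
  intro r hr
  rw [List.mem_range] at hr
  by_cases h1 : r < i
  · rw [if_pos h1, if_pos (by omega)]
  · by_cases h2 : r = i
    · subst h2
      rw [if_neg h1, if_pos rfl, if_pos (by omega)]
      unfold pvRowV
      apply List.map_congr_left
      intro c hc
      rw [List.mem_range] at hc
      by_cases hcm : c = m
      · subst hcm; rw [if_pos rfl]
      · rw [if_neg hcm, if_pos (by omega)]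
    · rw [if_neg h1, if_neg h2, if_neg (by omega)]
      by_cases h3 : r = i + 1
      · subst h3; rw [if_pos rfl, pvRowV_zero_false]
      · rw [if_neg h3]

lemma pvInit_eq (a b : List Int) (m : Nat) :
    pvSetCell (List.replicate (m + 1) (List.replicate (m + 1) false)) 0 0 true
      = pvMatV a b m 1 0 false := by
  unfold pvSetCell
  simp only [Int.toNat_zero]
  rw [show (List.replicate (m + 1) (List.replicate (m + 1) false)).getD 0 []
      = List.replicate (m + 1) false from by simp [List.getD_eq_getElem?_getD]]
  apply List.ext_getElem (by simp [pvMatV])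
  intro r h1 h2
  simp only [pvMatV, List.getElem_map, List.getElem_range]
  rw [List.getElem_set]
  by_cases hr : r = 0
  · subst hr
    rw [if_pos rfl, if_pos (by omega : 0 < 1)]
    apply List.ext_getElem (by simp)
    intro c c1 c2
    rw [List.getElem_set]
    simp only [List.getElem_map, List.getElem_range, List.getElem_replicate]
    by_cases hc : c = 0
    · simp [hc, pvSpecCell]
    · have hs : pvSpecCell a b 0 c = false := by
        unfold pvSpecCell; rw [decide_eq_false_iff_not]; rintro ⟨h0, -⟩; omega
      simp [Ne.symm hc, hs]
  · rw [if_neg (by omega : ¬ (0 = r)), if_neg (by omega : ¬ r < 1), List.getElem_replicate]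
    by_cases h3 : r = 1
    · simp [h3, pvRowV_zero_false]
    · simp [h3]

-- a fired guard forces a nonnegative b-slice start (else the b slice is too short)
lemma pvGuard_nonneg (a b : List Int) (m i j k : Nat)
    (hla : m ≤ a.length) (hlb : m ≤ b.length)
    (hk : k < i) (hi : i ≤ m) (hj : j ≤ m)
    (hg : (PySem.List.sorted (PySem.List.slice a (some (k : Int)) (some (i : Int))) (fun x => x) false
      == PySem.List.sorted (PySem.List.slice b (some ((j : Int) - ((i : Int) - (k : Int)))) (some (j : Int))) (fun x => x) false) = true) :
    0 ≤ (j : Int) - ((i : Int) - (k : Int)) := by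
  by_contra hneg
  have hneg : (j : Int) - ((i : Int) - (k : Int)) < 0 := by omega
  have he := eq_of_beq hg
  have hlen := congrArg List.length he
  rw [PySem.List.length_sorted, PySem.List.length_sorted] at hlen
  rw [PySem.List.length_slice, PySem.List.length_slice] at hlen
  set e : Int := (j : Int) - ((i : Int) - (k : Int)) with hedef
  have ht : e = -(((-e).toNat : Nat) : Int) := by omega
  rw [ht] at hlen
  rw [PySem.List.clampIdx_neg_natCast _ _ (by omega)] at hlen
  rw [PySem.List.clampIdx_natCast, PySem.List.clampIdx_natCast, PySem.List.clampIdx_natCast] at hlen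
  rw [Nat.min_eq_left (by omega), Nat.min_eq_left (by omega), Nat.min_eq_left (by omega)] at hlen
  have ht2 : (((-e).toNat : Nat) : Int) = (i : Int) - k - j := by omega
  omega

lemma pvKFold (a b : List Int) (m i j : Nat)
    (hla : m ≤ a.length) (hlb : m ≤ b.length)
    (hi : 1 ≤ i) (him : i ≤ m) (_hj : 1 ≤ j) (hjm : j ≤ m) :
    ∀ (K : Nat), K ≤ i → ∀ (v : Bool),
      (PySem.List.pyRange 0 (K : Int) 1).foldl (pvKBody a b (i : Int) (j : Int)) (pvMatV a b m i j v)
        = pvMatV a b m i j (v || pvOrK a b i j K) := by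
  intro K
  induction K with
  | zero =>
    intro _ v
    rw [Nat.cast_zero, PySem.List.pyRange_one_eq_nil (by omega)]
    simp [pvOrK]
  | succ K ih =>
    intro hK v
    have hcast : ((K + 1 : Nat) : Int) = (K : Int) + 1 := by push_cast; ring
    rw [hcast, PySem.List.pyRange_one_succ_right (by omega), List.foldl_append, ih (by omega)]
    simp only [List.foldl_cons, List.foldl_nil]
    have horK : pvOrK a b i j (K + 1)
        = (pvOrK a b i j K ||
          ((PySem.List.sorted (PySem.List.slice a (some (K : Int)) (some (i : Int))) (fun x => x) false
            == PySem.List.sorted (PySem.List.slice b (some ((j : Int) - ((i : Int) - (K : Int)))) (some (j : Int))) (fun x => x) false)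
          && pvSpecCell a b K ((j : Int) - (i : Int) + (K : Int)).toNat)) := by
      unfold pvOrK
      rw [List.range_succ]
      simp [List.any_append]
    unfold pvKBody
    by_cases hgg : (PySem.List.sorted (PySem.List.slice a (some (K : Int)) (some (i : Int))) (fun x => x) false
        == PySem.List.sorted (PySem.List.slice b (some ((j : Int) - ((i : Int) - (K : Int)))) (some (j : Int))) (fun x => x) false) = true
    · rw [if_pos hgg]
      have hnn := pvGuard_nonneg a b m i j K hla hlb (by omega) him hjm hgg
      rw [show ((j : Int) - ((i : Int) - (K : Int))) = ((j : Int) - (i : Int) + (K : Int)) from by ring]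
      rw [pvGetCell_matV_self a b m i j _ him hjm]
      have hnn' : (0 : Int) ≤ (j : Int) - (i : Int) + (K : Int) := by omega
      have hread : pvGetCell (pvMatV a b m i j (v || pvOrK a b i j K)) (K : Int)
          ((j : Int) - (i : Int) + (K : Int)) = pvSpecCell a b K ((j : Int) - (i : Int) + (K : Int)).toNat := by
        rw [show ((j : Int) - (i : Int) + (K : Int)) = ((((j : Int) - (i : Int) + (K : Int)).toNat : Nat) : Int) from
          (Int.toNat_of_nonneg hnn').symm]
        rw [Int.toNat_natCast]
        exact pvGetCell_matV_lt a b m i j _ K _ (by omega) (by omega) (by omega)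
      rw [hread, pvSetCell_matV a b m i j _ _ him hjm]
      congr 1
      rw [horK, hgg, Bool.true_and, Bool.or_assoc]
    · rw [if_neg hgg]
      rw [horK]
      have : (PySem.List.sorted (PySem.List.slice a (some (K : Int)) (some (i : Int))) (fun x => x) false
          == PySem.List.sorted (PySem.List.slice b (some ((j : Int) - ((i : Int) - (K : Int)))) (some (j : Int))) (fun x => x) false) = false :=
        Bool.not_eq_true _ ▸ by simpa using hgg
      rw [this]
      simp

-- the mathematical core: the cell value A computes equals pvSpecCell
lemma pvCore (a b : List Int) (m i j : Nat) (v1 : Bool)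
    (hla : m ≤ a.length) (hlb : m ≤ b.length)
    (hi : 1 ≤ i) (him : i ≤ m) (hj : 1 ≤ j) (hjm : j ≤ m)
    (hv : v1 = true ↔ (a.getD (i - 1) 0 = b.getD (j - 1) 0 ∧ pvSpecCell a b (i - 1) (j - 1) = true)) :
    (v1 || pvOrK a b i j i) = pvSpecCell a b i j := by
  have hia : i - 1 < a.length := by omega
  have hjb : j - 1 < b.length := by omega
  rw [Bool.eq_iff_iff]
  constructor
  · intro h
    rw [Bool.or_eq_true] at h
    rcases h with h1 | h2
    · obtain ⟨hab, hs⟩ := hv.mp h1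
      obtain ⟨hij, hperm⟩ : (i - 1 = j - 1) ∧ (a.take (i - 1)).Perm (b.take (i - 1)) := by
        unfold pvSpecCell at hs; exact of_decide_eq_true hs
      have hij' : i = j := by omega
      unfold pvSpecCell
      rw [decide_eq_true_iff]
      refine ⟨hij', ?_⟩
      have hta : a.take i = a.take (i - 1) ++ [a.getD (i - 1) 0] := by
        conv_lhs => rw [show i = (i - 1) + 1 from by omega]
        rw [List.take_add_one, List.getElem?_eq_getElem hia]
        rw [List.getD_eq_getElem?_getD, List.getElem?_eq_getElem hia]
        rfl
      have hib : i - 1 < b.length := by omega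
      have htb : b.take i = b.take (i - 1) ++ [b.getD (i - 1) 0] := by
        conv_lhs => rw [show i = (i - 1) + 1 from by omega]
        rw [List.take_add_one, List.getElem?_eq_getElem hib]
        rw [List.getD_eq_getElem?_getD, List.getElem?_eq_getElem hib]
        rfl
      rw [hta, htb]
      apply hperm.append
      have hbb : a.getD (i - 1) 0 = b.getD (i - 1) 0 := by
        rw [hab]; congr 1; omega
      rw [hbb]
    · unfold pvOrK at h2
      obtain ⟨k, hkmem, hconj⟩ := List.any_eq_true.mp h2
      rw [List.mem_range] at hkmem
      rw [Bool.and_eq_true] at hconj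
      obtain ⟨hg, hs⟩ := hconj
      have hnn := pvGuard_nonneg a b m i j k hla hlb hkmem him hjm hg
      obtain ⟨hkc, hpermk⟩ : (k = ((j : Int) - (i : Int) + (k : Int)).toNat) ∧ (a.take k).Perm (b.take k) := by
        unfold pvSpecCell at hs; exact of_decide_eq_true hs
      have hij' : i = j := by omega
      have hsl := (PySem.List.sorted_id_eq_sorted_id_iff_perm _ _).mp (eq_of_beq hg)
      rw [show ((j : Int) - ((i : Int) - (k : Int))) = ((k : Nat) : Int) from by omega] at hsl
      rw [PySem.List.slice_natCast, PySem.List.slice_natCast] at hsl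
      unfold pvSpecCell
      rw [decide_eq_true_iff]
      refine ⟨hij', ?_⟩
      have hjk : j - k = i - k := by omega
      rw [hjk] at hsl
      have key : (a.take (k + (i - k))).Perm (b.take (k + (i - k))) := by
        rw [List.take_add, List.take_add]
        exact hpermk.append hsl
      rw [show k + (i - k) = i from by omega] at key
      exact key
  · intro h
    obtain ⟨hij, hperm⟩ : (i = j) ∧ (a.take i).Perm (b.take i) := by
      unfold pvSpecCell at h; exact of_decide_eq_true h
    rw [Bool.or_eq_true]
    right
    unfold pvOrK
    apply List.any_eq_true.mpr
    refine ⟨0, List.mem_range.mpr (by omega), ?_⟩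
    rw [Bool.and_eq_true]
    constructor
    · apply beq_iff_eq.mpr
      rw [PySem.List.slice_natCast]
      rw [show ((j : Int) - ((i : Int) - ((0 : Nat) : Int))) = (((0 : Nat) : Nat) : Int) from by omega]
      rw [PySem.List.slice_natCast]
      simp only [List.drop_zero, Nat.sub_zero]
      rw [← hij]
      exact (PySem.List.sorted_id_eq_sorted_id_iff_perm _ _).mpr hperm
    · unfold pvSpecCell
      rw [show (((j : Int) - (i : Int) + ((0 : Nat) : Int))).toNat = 0 from by omega]
      rw [decide_eq_true_iff]
      exact ⟨rfl, by simp⟩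

lemma pvCell (a b : List Int) (m i j : Nat)
    (hla : m ≤ a.length) (hlb : m ≤ b.length)
    (hi : 1 ≤ i) (him : i ≤ m) (hj : 1 ≤ j) (hjm : j ≤ m) :
    pvJBody a b (i : Int) (pvMatV a b m i j false) (j : Int)
      = pvMatV a b m i j (pvSpecCell a b i j) := by
  unfold pvJBody
  rw [show ((i : Int) - 1) = ((i - 1 : Nat) : Int) from by omega,
      show ((j : Int) - 1) = ((j - 1 : Nat) : Int) from by omega]
  rw [PySem.List.pyGetD_natCast, PySem.List.pyGetD_natCast]
  rw [pvGetCell_matV_lt a b m i j false (i - 1) (j - 1) (by omega) (by omega) (by omega)]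
  split
  case isTrue hc =>
    rw [pvSetCell_matV a b m i j _ _ him hjm]
    rw [pvKFold a b m i j hla hlb hi him hj hjm i le_rfl]
    congr 1
    exact pvCore a b m i j _ hla hlb hi him hj hjm
      ⟨fun h => ⟨eq_of_beq hc, h⟩, fun ⟨_, h⟩ => h⟩
  case isFalse hc =>
    rw [pvKFold a b m i j hla hlb hi him hj hjm i le_rfl]
    congr 1
    refine pvCore a b m i j false hla hlb hi him hj hjm ?_
    constructor
    · intro h; exact absurd h (by simp)
    · rintro ⟨he, -⟩
      exact absurd (beq_iff_eq.mpr he) hc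

lemma pvRowLoop (a b : List Int) (m i : Nat)
    (hla : m ≤ a.length) (hlb : m ≤ b.length)
    (hi : 1 ≤ i) (him : i ≤ m) :
    pvIBody a b (m : Int) (pvMatV a b m i 0 false) (i : Int)
      = pvMatV a b m (i + 1) 0 false := by
  unfold pvIBody
  have H : ∀ jr : Nat, jr ≤ m →
      (PySem.List.pyRange 1 ((jr : Int) + 1) 1).foldl (pvJBody a b (i : Int)) (pvMatV a b m i 0 false)
        = pvMatV a b m i jr (pvSpecCell a b i jr) := by
    intro jr
    induction jr with
    | zero =>
      intro _
      rw [Nat.cast_zero, zero_add, PySem.List.pyRange_one_eq_nil (by omega)]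
      have : pvSpecCell a b i 0 = false := by
        unfold pvSpecCell; rw [decide_eq_false_iff_not]; rintro ⟨h0, -⟩; omega
      rw [this]
      rfl
    | succ t ih =>
      intro h
      rw [show ((t + 1 : Nat) : Int) + 1 = ((t : Int) + 1) + 1 from by push_cast; ring]
      rw [PySem.List.pyRange_one_succ_right (by omega), List.foldl_append, ih (by omega)]
      simp only [List.foldl_cons, List.foldl_nil]
      rw [pvMatV_col_shift]
      rw [show ((t : Int) + 1) = ((t + 1 : Nat) : Int) from by push_cast; ring]
      exact pvCell a b m i (t + 1) hla hlb hi him (by omega) h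
  rw [show ((m : Int) + 1) = ((m : Int) + 1) from rfl]
  rw [H m le_rfl]
  exact pvMatV_row_shift a b m i

lemma pvOuterLoop (a b : List Int) (m : Nat)
    (hla : m ≤ a.length) (hlb : m ≤ b.length) :
    ∀ (r : Nat), r ≤ m →
      (PySem.List.pyRange 1 ((r : Int) + 1) 1).foldl (pvIBody a b (m : Int))
          (pvMatV a b m 1 0 false)
        = pvMatV a b m (r + 1) 0 false := by
  intro r
  induction r with
  | zero =>
    intro _
    rw [Nat.cast_zero, zero_add, PySem.List.pyRange_one_eq_nil (by omega)]
    rfl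
  | succ t ih =>
    intro h
    rw [show ((t + 1 : Nat) : Int) + 1 = ((t : Int) + 1) + 1 from by push_cast; ring]
    rw [PySem.List.pyRange_one_succ_right (by omega), List.foldl_append, ih (by omega)]
    simp only [List.foldl_cons, List.foldl_nil]
    rw [show ((t : Int) + 1) = ((t + 1 : Nat) : Int) from by push_cast; ring]
    exact pvRowLoop a b m (t + 1) hla hlb (by omega) h

-- ===== VERDICT (by name: the statement is the Claim_ definition above) =====
theorem can_swap_arrays_spec : Claim_equal_can_swap_arrays := by
  intro a b n _ hpre
  obtain ⟨h0, hla, hlb⟩ := hpre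
  unfold Spec_can_swap_arrays
  have hn : n = ((n.toNat : Nat) : Int) := by omega
  rw [hn]
  set m : Nat := n.toNat with hm
  have hla' : m ≤ a.length := by omega
  have hlb' : m ≤ b.length := by omega
  unfold can_swap_arrays can_swap_arrays_alt
  rw [show ((m : Int) + 1).toNat = m + 1 from by omega]
  rw [pvInit_eq a b m]
  rw [pvOuterLoop a b m hla' hlb' m le_rfl]
  rw [pvGetCell_matV_lt a b m (m + 1) 0 false m m (by omega) le_rfl le_rfl]
  rw [PySem.List.slice_to_natCast, PySem.List.slice_to_natCast]
  by_cases hp : (a.take m).Perm (b.take m)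
  · have h1 : pvSpecCell a b m m = true := by
      unfold pvSpecCell; exact decide_eq_true ⟨rfl, hp⟩
    rw [h1]
    exact (beq_iff_eq.mpr ((PySem.List.sorted_id_eq_sorted_id_iff_perm _ _).mpr hp)).symm
  · have h1 : pvSpecCell a b m m = false := by
      unfold pvSpecCell; rw [decide_eq_false_iff_not]; rintro ⟨-, hpp⟩; exact hp hpp
    rw [h1]
    symm
    rw [beq_eq_false_iff_ne]
    intro he
    exact hp ((PySem.List.sorted_id_eq_sorted_id_iff_perm _ _).mp he)
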